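-- pv_equiv track=rewrite | github.com/erfan-mehraban/debloating-software-infrastructure | related-works/cimplifier/code/partition.py | reduce_volumes
-- ===== SOURCE A (Python) =====
-- def isancestor(ancpath, despath):
--     if ancpath[-1] == '/':
--         ancpath = ancpath[:-1]
--     return despath.startswith(ancpath) and (len(despath) == len(ancpath) or
--             despath[len(ancpath)] == '/')
--
-- def reduce_volumes(files, volumes):
--     def vol_accessed(vol):
--         for file in files:
--             if isancestor(vol, file):
--                 return True
--         return False
--     red_vols = list(filter(vol_accessed, volumes))
--     return red_vols
-- ===== SOURCE B (Python) =====
-- def reduce_volumes(files, volumes):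
--     # Build once the set of all strings that, as a volume path (after the
--     # single-trailing-slash strip), are an ancestor of some file: the file
--     # itself and every prefix of it that ends just before a '/'.
--     anc = set()
--     for f in files:
--         anc.add(f)
--         for i, c in enumerate(f):
--             if c == '/':
--                 anc.add(f[:i])
--     return [v for v in volumes if (v[:-1] if v.endswith('/') else v) in anc]
-- ===== Notes on version B (the rewrite author's own statement) =====
-- stated objective: faster
-- what changed: Instead of testing every (volume, file) pair with isancestor, B builds once a set of every ancestor path of every file (the file itself and each prefix ending just before a '/') and then answers each volume with a single hash-set membership test on the volume stripped of one trailing slash.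
import Mathlib
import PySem

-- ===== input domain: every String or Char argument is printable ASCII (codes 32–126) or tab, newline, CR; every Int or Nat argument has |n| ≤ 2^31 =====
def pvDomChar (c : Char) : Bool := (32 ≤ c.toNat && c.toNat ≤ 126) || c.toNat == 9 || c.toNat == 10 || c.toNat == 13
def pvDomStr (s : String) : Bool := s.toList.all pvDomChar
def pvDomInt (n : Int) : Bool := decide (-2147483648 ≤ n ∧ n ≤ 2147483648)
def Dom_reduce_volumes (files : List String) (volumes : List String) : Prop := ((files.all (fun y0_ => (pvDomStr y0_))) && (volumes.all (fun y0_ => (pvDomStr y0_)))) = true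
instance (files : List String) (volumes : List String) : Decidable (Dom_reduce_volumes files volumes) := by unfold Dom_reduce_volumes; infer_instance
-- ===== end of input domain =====

-- B replaces the per-volume scan of all files by one precomputed set of every
-- ancestor path of every file, then a single membership test per volume (objective: faster).

-- ===== PORT A =====
-- isancestor(ancpath, despath); Python raises IndexError on ancpath = "" (pyGet? = none),
-- those calls are outside Pre_; the 'false' branch is never reached under Pre_.
def pyIsancestor (ancpath despath : String) : Bool :=
  match PySem.Str.pyGet? ancpath (-1) with
  | none => false
  | some c =>
      let ap := if c = '/' then PySem.Str.slice ancpath none (some (-1)) else ancpath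
      PySem.Str.startswith despath ap &&
        (PySem.Str.len despath == PySem.Str.len ap ||
          PySem.Str.pyGet? despath (PySem.Str.len ap) == some '/')

def reduce_volumes (files : List String) (volumes : List String) : List String :=
  volumes.filter (fun vol => files.any (fun file => pyIsancestor vol file))

-- ===== PORT B =====
-- for f in files: anc.add(f); for i, c in enumerate(f): if c == '/': anc.add(f[:i])
def ancestorsAdd (s : PySem.Set String) (f : String) : PySem.Set String :=
  (PySem.List.enumerate f.toList 0).foldl
    (fun s p => if p.2 = '/' then PySem.Set.add s (PySem.Str.slice f none (some p.1)) else s)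
    (PySem.Set.add s f)

def reduce_volumes_alt (files : List String) (volumes : List String) : List String :=
  let anc := files.foldl ancestorsAdd PySem.Set.empty
  volumes.filter (fun v =>
    PySem.Set.contains anc
      (if PySem.Str.endswith v "/" then PySem.Str.slice v none (some (-1)) else v))

-- ===== PRECONDITION & SPEC =====
-- Pre_ excludes the inputs on which A raises: with a non-empty file list, a volume "" makes
-- isancestor evaluate ""[-1] and raise IndexError.
def Pre_reduce_volumes (files : List String) (volumes : List String) : Prop :=
  files = [] ∨ "" ∉ volumes
instance (files : List String) (volumes : List String) : Decidable (Pre_reduce_volumes files volumes) := by unfold Pre_reduce_volumes; infer_instance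

def pvWitness_reduce_volumes : List String × List String := (["a/b"], ["a", "c", "a/"])

def Spec_reduce_volumes (files : List String) (volumes : List String) (out : List String) : Prop := out = reduce_volumes_alt files volumes
instance (files : List String) (volumes : List String) (out : List String) : Decidable (Spec_reduce_volumes files volumes out) := by unfold Spec_reduce_volumes; infer_instance

-- ===== CLAIM (what is proved, stated in full; the proofs are below) =====
def Claim_equal_reduce_volumes : Prop := ∀ (files : List String) (volumes : List String), Dom_reduce_volumes files volumes → Pre_reduce_volumes files volumes → Spec_reduce_volumes files volumes (reduce_volumes files volumes)

-- ===== LEMMAS AND PROOFS =====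

-- y is an "ancestor string" of file f: f itself, or a prefix of f cut just before a '/'.
def AncOf (f y : String) : Prop :=
  y = f ∨ ∃ (k : Nat) (_ : k < f.toList.length),
    f.toList[k] = '/' ∧ y = PySem.Str.slice f none (some (k : Int))

theorem string_eq_iff (s t : String) : s = t ↔ s.toList = t.toList :=
  ⟨fun h => h ▸ rfl, String.ext⟩

theorem toList_slice_take (f : String) (k : Nat) :
    (PySem.Str.slice f none (some (k : Int))).toList = f.toList.take k := by
  rw [PySem.Str.toList_slice, PySem.Chars.slice_eq_listSlice, PySem.List.slice_to_natCast]

-- the core combinatorial fact, at the List Char level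
theorem core_iff (a d : List Char) :
    (a <+: d ∧ (d.length = a.length ∨ d[a.length]? = some '/')) ↔
    (a = d ∨ ∃ (k : Nat) (_ : k < d.length), d[k] = '/' ∧ a = d.take k) := by
  constructor
  · rintro ⟨hp, h | h⟩
    · exact Or.inl (hp.eq_of_length h.symm)
    · have hlt : a.length < d.length := by
        by_contra hge
        simp [List.getElem?_eq_none (le_of_not_gt hge)] at h
      refine Or.inr ⟨a.length, hlt, ?_, ?_⟩
      · have := List.getElem?_eq_getElem hlt
        rw [this] at h; exact Option.some.inj h
      · exact List.prefix_iff_eq_take.mp hp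
  · rintro (rfl | ⟨k, hk, hc, rfl⟩)
    · exact ⟨List.prefix_refl _, Or.inl rfl⟩
    · have hlen : (d.take k).length = k := by simp [List.length_take, Nat.min_eq_left hk.le]
      refine ⟨List.take_prefix _ _, Or.inr ?_⟩
      rw [hlen, List.getElem?_eq_getElem hk, hc]

theorem getLast?_slash_iff (l : List Char) :
    (['/'] <:+ l) ↔ l.getLast? = some '/' := by
  constructor
  · rintro ⟨t, rfl⟩; simp
  · intro h
    rcases List.getLast?_eq_some_iff.mp h with ⟨l', rfl⟩
    exact ⟨l', rfl⟩

-- for a non-empty volume v, A's per-file test is exactly "normalized v is an ancestor of f"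
theorem isancestor_iff (v f : String) (hv : v ≠ "") :
    pyIsancestor v f = true ↔
      AncOf f (if PySem.Str.endswith v "/" then PySem.Str.slice v none (some (-1)) else v) := by
  have hvl : v.toList ≠ [] := by
    intro h; exact hv (String.ext (by simp [h]))
  have hget : PySem.Str.pyGet? v (-1) = v.toList.getLast? := by
    simp [PySem.List.pyGet?_neg_one]
  obtain ⟨c, hc⟩ : ∃ c, v.toList.getLast? = some c :=
    ⟨v.toList.getLast hvl, List.getLast?_eq_some_getLast hvl⟩
  have hends : PySem.Str.endswith v "/" = (c == '/') := by
    by_cases hc' : c = '/'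
    · subst hc'
      simp only [beq_self_eq_true]
      have h1 : ['/'] <:+ v.toList := (getLast?_slash_iff v.toList).mpr hc
      have h2 := (PySem.Chars.endswith_iff v.toList "/".toList).mpr (by simpa using h1)
      simpa using h2
    · have hb : (c == '/') = false := by simpa using hc'
      rw [hb, ← Bool.not_eq_true]
      intro hcon
      have h1 := (PySem.Chars.endswith_iff v.toList "/".toList).mp (by simpa using hcon)
      have h2 := (getLast?_slash_iff v.toList).mp (by simpa using h1)
      rw [hc] at h2
      exact hc' (Option.some.inj h2)
  unfold pyIsancestor
  rw [hget, hc]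
  simp only []
  -- the normalized volume
  set ap := if c = '/' then PySem.Str.slice v none (some (-1)) else v with hap
  have hsame : (if PySem.Str.endswith v "/" then PySem.Str.slice v none (some (-1)) else v) = ap := by
    rw [hends, hap]
    by_cases h : c = '/' <;> simp [h]
  rw [hsame]
  -- unfold the boolean into the core iff
  rw [Bool.and_eq_true, Bool.or_eq_true, beq_iff_eq, beq_iff_eq]
  have hs : PySem.Str.startswith f ap = true ↔ ap.toList <+: f.toList := by
    have := PySem.Chars.startswith_iff f.toList ap.toList
    simpa using this
  have hlen : PySem.Str.len f = (f.toList.length : Int) := PySem.Str.len_eq f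
  have hlena : PySem.Str.len ap = (ap.toList.length : Int) := PySem.Str.len_eq ap
  rw [hs, hlen, hlena, PySem.Str.pyGet?_natCast]
  have hlen_iff : ((f.toList.length : Int) = (ap.toList.length : Int)) ↔ f.toList.length = ap.toList.length := by exact_mod_cast Iff.rfl
  rw [hlen_iff]
  rw [core_iff ap.toList f.toList]
  unfold AncOf
  constructor
  · rintro (h | ⟨k, hk, hck, htk⟩)
    · exact Or.inl (String.ext h)
    · exact Or.inr ⟨k, hk, hck, (string_eq_iff _ _).mpr (by rw [toList_slice_take, htk])⟩
  · rintro (rfl | ⟨k, hk, hck, heq⟩)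
    · exact Or.inl rfl
    · exact Or.inr ⟨k, hk, hck, by rw [heq, toList_slice_take]⟩

theorem mem_foldl_sliceAdd (f : String) (l : List (Int × Char)) (s : PySem.Set String) (y : String) :
    y ∈ l.foldl (fun s p => if p.2 = '/' then PySem.Set.add s (PySem.Str.slice f none (some p.1)) else s) s ↔
    y ∈ s ∨ ∃ p ∈ l, p.2 = '/' ∧ y = PySem.Str.slice f none (some p.1) := by
  induction l generalizing s with
  | nil => simp
  | cons hd tl ih =>
    by_cases h : hd.2 = '/'
    · simp only [List.foldl_cons, if_pos h, ih, PySem.Set.mem_add, List.mem_cons]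
      constructor
      · rintro ((h1 | h1) | ⟨p, hp, hc, h2⟩)
        · exact Or.inl h1
        · exact Or.inr ⟨hd, Or.inl rfl, h, h1⟩
        · exact Or.inr ⟨p, Or.inr hp, hc, h2⟩
      · rintro (h1 | ⟨p, hp, hc, h2⟩)
        · exact Or.inl (Or.inl h1)
        · rcases hp with rfl | hp
          · exact Or.inl (Or.inr h2)
          · exact Or.inr ⟨p, hp, hc, h2⟩
    · simp only [List.foldl_cons, if_neg h, ih, List.mem_cons]
      constructor
      · rintro (h1 | ⟨p, hp, hc, h2⟩)
        · exact Or.inl h1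
        · exact Or.inr ⟨p, Or.inr hp, hc, h2⟩
      · rintro (h1 | ⟨p, hp, hc, h2⟩)
        · exact Or.inl h1
        · rcases hp with rfl | hp
          · exact absurd hc h
          · exact Or.inr ⟨p, hp, hc, h2⟩

theorem mem_ancestorsAdd (s : PySem.Set String) (f y : String) :
    y ∈ ancestorsAdd s f ↔ y ∈ s ∨ AncOf f y := by
  unfold ancestorsAdd
  rw [mem_foldl_sliceAdd, PySem.Set.mem_add]
  unfold AncOf
  constructor
  · rintro (⟨h | h⟩ | ⟨p, hp, hc, rfl⟩)
    · exact Or.inl h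
    · exact Or.inr (Or.inl h)
    · rcases (PySem.List.mem_enumerate_iff _ _ _).mp hp with ⟨k, hk, hpk⟩
      refine Or.inr (Or.inr ⟨k, hk, ?_, ?_⟩)
      · rw [hpk] at hc; exact hc
      · rw [hpk]; norm_num
  · rintro (h | h | ⟨k, hk, hck, rfl⟩)
    · exact Or.inl (Or.inl h)
    · exact Or.inl (Or.inr h)
    · refine Or.inr ⟨((k : Int), f.toList[k]), ?_, hck, rfl⟩
      exact (PySem.List.mem_enumerate_iff _ _ _).mpr ⟨k, hk, by norm_num⟩

theorem mem_buildSet (files : List String) (s : PySem.Set String) (y : String) :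
    y ∈ files.foldl ancestorsAdd s ↔ y ∈ s ∨ ∃ f ∈ files, AncOf f y := by
  induction files generalizing s with
  | nil => simp
  | cons hd tl ih =>
    simp only [List.foldl_cons, ih, mem_ancestorsAdd, List.mem_cons]
    constructor
    · rintro ((h | h) | ⟨f, hf, ha⟩)
      · exact Or.inl h
      · exact Or.inr ⟨hd, Or.inl rfl, h⟩
      · exact Or.inr ⟨f, Or.inr hf, ha⟩
    · rintro (h | ⟨f, rfl | hf, ha⟩)
      · exact Or.inl (Or.inl h)
      · exact Or.inl (Or.inr ha)
      · exact Or.inr ⟨f, hf, ha⟩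

theorem pred_eq (files : List String) (v : String) (hv : v ≠ "") :
    (files.any (fun file => pyIsancestor v file)) =
    PySem.Set.contains (files.foldl ancestorsAdd PySem.Set.empty)
      (if PySem.Str.endswith v "/" then PySem.Str.slice v none (some (-1)) else v) := by
  apply Bool.eq_iff_iff.mpr
  rw [List.any_eq_true, PySem.Set.contains_iff, mem_buildSet]
  constructor
  · rintro ⟨f, hf, ha⟩
    exact Or.inr ⟨f, hf, (isancestor_iff v f hv).mp ha⟩
  · rintro (h | ⟨f, hf, ha⟩)
    · simp [PySem.Set.empty] at h
    · exact ⟨f, hf, (isancestor_iff v f hv).mpr ha⟩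

-- ===== VERDICT (by name: the statement is the Claim_ definition above) =====
theorem reduce_volumes_spec : Claim_equal_reduce_volumes := by
  intro files volumes _ hpre
  unfold Spec_reduce_volumes reduce_volumes reduce_volumes_alt
  rcases hpre with rfl | hpre
  · simp only []
    apply List.filter_congr
    intro v _
    simp [PySem.Set.contains, PySem.Set.empty]
  · simp only []
    apply List.filter_congr
    intro v hvmem
    exact pred_eq files v (fun h => hpre (h ▸ hvmem))
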